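-- pv_equiv track=rewrite | github.com/miniPCB/test_base | test_editor.py | build_variables_summary
-- ===== SOURCE A (Python) =====
-- def build_variables_summary(test: dict) -> str:
--     """Build a human-readable text summary of test variables for the right pane."""
--     lines = []
--
--     # Testpoints
--     tps = test.get("testpoints", [])
--     lines.append("TESTPOINTS")
--     lines.append("----------")
--     if tps:
--         for tp in tps:
--             name = tp.get("name", "")
--             role = tp.get("role", "")
--             ref = tp.get("schematic_ref", "")
--             net = tp.get("net", "")
--             desc = tp.get("description", "")
--             lines.append(f"- {name} ({role}) [{ref}/{net}] - {desc}")
--     else: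
--         lines.append("(none defined)")
--     lines.append("")
--
--     # Measurement equipment
--     eqs = test.get("measurement_equipment", [])
--     lines.append("MEASUREMENT EQUIPMENT")
--     lines.append("---------------------")
--     if eqs:
--         for eq in eqs:
--             eid = eq.get("id", "")
--             etype = eq.get("type", "")
--             model = eq.get("model", "")
--             serial = eq.get("serial", "")
--             loc = eq.get("location", "")
--             notes = eq.get("notes", "")
--             lines.append(f"- {eid}: {etype} {model} (SN {serial}), {loc} - {notes}")
--     else:
--         lines.append("(none defined)")
--     lines.append("")
--
--     # Measurement settings
--     msets = test.get("measurement_settings", [])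
--     lines.append("MEASUREMENT SETTINGS")
--     lines.append("---------------------")
--     if msets:
--         for ms in msets:
--             eid = ms.get("equipment_id", "")
--             mode = ms.get("mode", "")
--             r = ms.get("range", "")
--             samp = ms.get("sampling", "")
--             other = ms.get("other_settings", "")
--             lines.append(f"- {eid}: mode={mode}, range={r}, sampling={samp}, {other}")
--     else:
--         lines.append("(none defined)")
--     lines.append("")
--
--     # Acceptance thresholds
--     ths = test.get("acceptance_thresholds", [])
--     lines.append("ACCEPTANCE THRESHOLDS")
--     lines.append("----------------------")
--     if ths:
--         for th in ths:
--             p = th.get("parameter", "")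
--             tgt = th.get("target_value", "")
--             lo = th.get("lower_limit", "")
--             hi = th.get("upper_limit", "")
--             units = th.get("units", "")
--             notes = th.get("notes", "")
--             lines.append(f"- {p}: target={tgt} {units}, [{lo}, {hi}] {units} - {notes}")
--     else:
--         lines.append("(none defined)")
--     lines.append("")
--
--     # Example data
--     exs = test.get("example_data", [])
--     lines.append("EXAMPLE DATA")
--     lines.append("------------")
--     if exs:
--         for ex in exs:
--             t = ex.get("type", "")
--             d = ex.get("description", "")
--             v = ex.get("data_value", "")
--             f = ex.get("file_ref", "")
--             notes = ex.get("notes", "")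
--             lines.append(f"- {t}: {d} value={v} file={f} - {notes}")
--     else:
--         lines.append("(none defined)")
--     lines.append("")
--
--     return "\n".join(lines)
-- ===== SOURCE B (Python) =====
-- _SPECS = [
--     ("testpoints", "TESTPOINTS", "----------",
--      ["- ", " (", ") [", "/", "] - ", ""],
--      ["name", "role", "schematic_ref", "net", "description"]),
--     ("measurement_equipment", "MEASUREMENT EQUIPMENT", "---------------------",
--      ["- ", ": ", " ", " (SN ", "), ", " - ", ""],
--      ["id", "type", "model", "serial", "location", "notes"]),
--     ("measurement_settings", "MEASUREMENT SETTINGS", "---------------------",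
--      ["- ", ": mode=", ", range=", ", sampling=", ", ", ""],
--      ["equipment_id", "mode", "range", "sampling", "other_settings"]),
--     ("acceptance_thresholds", "ACCEPTANCE THRESHOLDS", "----------------------",
--      ["- ", ": target=", " ", ", [", ", ", "] ", " - ", ""],
--      ["parameter", "target_value", "units", "lower_limit", "upper_limit", "units", "notes"]),
--     ("example_data", "EXAMPLE DATA", "------------",
--      ["- ", ": ", " value=", " file=", " - ", ""],
--      ["type", "description", "data_value", "file_ref", "notes"]),
-- ]
--
--
-- def _line(frags, fields, d):
--     """Interleave literal fragments with the fetched field values."""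
--     out = frags[0]
--     for k, frag in zip(fields, frags[1:]):
--         out += d.get(k, "") + frag
--     return out
--
--
-- def _section(test, spec):
--     """One section as a single string with embedded newlines (ends with '\\n')."""
--     key, title, sep, frags, fields = spec
--     items = test.get(key, [])
--     body = "".join(_line(frags, fields, d) + "\n" for d in items) if items else "(none defined)\n"
--     return title + "\n" + sep + "\n" + body
--
--
-- def build_variables_summary(test: dict) -> str:
--     """Build a human-readable text summary of test variables for the right pane."""
--     return "\n".join(_section(test, s) for s in _SPECS)
-- ===== Notes on version B (the rewrite author's own statement) =====
-- stated objective: alternative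
-- what changed: B builds each section directly as one string with embedded newlines from a fragment/field template table (no per-line list), concatenating item lines as it goes, and joins the five section strings once; A accumulates a flat list of individual lines with five unrolled f-string blocks and joins them at the end.
import Mathlib
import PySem

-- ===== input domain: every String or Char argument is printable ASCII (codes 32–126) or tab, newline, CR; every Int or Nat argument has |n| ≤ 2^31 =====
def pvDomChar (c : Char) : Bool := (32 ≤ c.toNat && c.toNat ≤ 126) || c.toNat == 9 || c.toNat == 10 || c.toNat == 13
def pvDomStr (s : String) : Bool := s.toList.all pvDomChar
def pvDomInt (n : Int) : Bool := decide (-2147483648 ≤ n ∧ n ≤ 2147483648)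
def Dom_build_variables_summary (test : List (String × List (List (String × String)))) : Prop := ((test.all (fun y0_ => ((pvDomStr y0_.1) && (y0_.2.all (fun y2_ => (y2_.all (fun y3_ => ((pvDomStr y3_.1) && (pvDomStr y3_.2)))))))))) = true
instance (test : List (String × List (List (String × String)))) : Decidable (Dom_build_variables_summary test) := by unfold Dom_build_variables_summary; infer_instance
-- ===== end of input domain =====

-- B replaces A's five unrolled per-line blocks (list of lines + one final join) by
-- direct string building: each section is produced as ONE string with embedded
-- newlines from a fragment/field template table, and the sections are joined
-- (objective: simpler/alternative decomposition).

-- ===== PORT A =====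
-- tp.get(k, "") on an inner dict (association list, first match wins)
def pvGetS (d : List (String × String)) (k : String) : String :=
  PySem.Dict.getD ⟨d⟩ k ""

-- test.get(k, []) on the outer dict
def pvGetL (test : List (String × List (List (String × String)))) (k : String) :
    List (List (String × String)) :=
  PySem.Dict.getD ⟨test⟩ k []

def build_variables_summary (test : List (String × List (List (String × String)))) : String :=
  let lines : List String := []
  -- Testpoints
  let tps := pvGetL test "testpoints"
  let lines := lines ++ ["TESTPOINTS"]
  let lines := lines ++ ["----------"]
  let lines :=
    if !tps.isEmpty then
      tps.foldl (fun ls tp =>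
        let name := pvGetS tp "name"
        let role := pvGetS tp "role"
        let ref := pvGetS tp "schematic_ref"
        let net := pvGetS tp "net"
        let desc := pvGetS tp "description"
        ls ++ ["- " ++ name ++ " (" ++ role ++ ") [" ++ ref ++ "/" ++ net ++ "] - " ++ desc]) lines
    else lines ++ ["(none defined)"]
  let lines := lines ++ [""]
  -- Measurement equipment
  let eqs := pvGetL test "measurement_equipment"
  let lines := lines ++ ["MEASUREMENT EQUIPMENT"]
  let lines := lines ++ ["---------------------"]
  let lines :=
    if !eqs.isEmpty then
      eqs.foldl (fun ls eq =>
        let eid := pvGetS eq "id"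
        let etype := pvGetS eq "type"
        let model := pvGetS eq "model"
        let serial := pvGetS eq "serial"
        let loc := pvGetS eq "location"
        let notes := pvGetS eq "notes"
        ls ++ ["- " ++ eid ++ ": " ++ etype ++ " " ++ model ++ " (SN " ++ serial ++ "), " ++ loc ++ " - " ++ notes]) lines
    else lines ++ ["(none defined)"]
  let lines := lines ++ [""]
  -- Measurement settings
  let msets := pvGetL test "measurement_settings"
  let lines := lines ++ ["MEASUREMENT SETTINGS"]
  let lines := lines ++ ["---------------------"]
  let lines :=
    if !msets.isEmpty then
      msets.foldl (fun ls ms =>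
        let eid := pvGetS ms "equipment_id"
        let mode := pvGetS ms "mode"
        let r := pvGetS ms "range"
        let samp := pvGetS ms "sampling"
        let other := pvGetS ms "other_settings"
        ls ++ ["- " ++ eid ++ ": mode=" ++ mode ++ ", range=" ++ r ++ ", sampling=" ++ samp ++ ", " ++ other]) lines
    else lines ++ ["(none defined)"]
  let lines := lines ++ [""]
  -- Acceptance thresholds
  let ths := pvGetL test "acceptance_thresholds"
  let lines := lines ++ ["ACCEPTANCE THRESHOLDS"]
  let lines := lines ++ ["----------------------"]
  let lines :=
    if !ths.isEmpty then
      ths.foldl (fun ls th =>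
        let p := pvGetS th "parameter"
        let tgt := pvGetS th "target_value"
        let lo := pvGetS th "lower_limit"
        let hi := pvGetS th "upper_limit"
        let units := pvGetS th "units"
        let notes := pvGetS th "notes"
        ls ++ ["- " ++ p ++ ": target=" ++ tgt ++ " " ++ units ++ ", [" ++ lo ++ ", " ++ hi ++ "] " ++ units ++ " - " ++ notes]) lines
    else lines ++ ["(none defined)"]
  let lines := lines ++ [""]
  -- Example data
  let exs := pvGetL test "example_data"
  let lines := lines ++ ["EXAMPLE DATA"]
  let lines := lines ++ ["------------"]
  let lines :=
    if !exs.isEmpty then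
      exs.foldl (fun ls ex =>
        let t := pvGetS ex "type"
        let d := pvGetS ex "description"
        let v := pvGetS ex "data_value"
        let f := pvGetS ex "file_ref"
        let notes := pvGetS ex "notes"
        ls ++ ["- " ++ t ++ ": " ++ d ++ " value=" ++ v ++ " file=" ++ f ++ " - " ++ notes]) lines
    else lines ++ ["(none defined)"]
  let lines := lines ++ [""]
  PySem.Str.join "\n" lines

-- ===== PORT B =====
-- Source B's _SPECS table: (key, title, separator, fragments, field keys)
def pvSpecs : List (String × String × String × List String × List String) :=
  [ ("testpoints", "TESTPOINTS", "----------",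
     ["- ", " (", ") [", "/", "] - ", ""],
     ["name", "role", "schematic_ref", "net", "description"]),
    ("measurement_equipment", "MEASUREMENT EQUIPMENT", "---------------------",
     ["- ", ": ", " ", " (SN ", "), ", " - ", ""],
     ["id", "type", "model", "serial", "location", "notes"]),
    ("measurement_settings", "MEASUREMENT SETTINGS", "---------------------",
     ["- ", ": mode=", ", range=", ", sampling=", ", ", ""],
     ["equipment_id", "mode", "range", "sampling", "other_settings"]),
    ("acceptance_thresholds", "ACCEPTANCE THRESHOLDS", "----------------------",
     ["- ", ": target=", " ", ", [", ", ", "] ", " - ", ""],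
     ["parameter", "target_value", "units", "lower_limit", "upper_limit", "units", "notes"]),
    ("example_data", "EXAMPLE DATA", "------------",
     ["- ", ": ", " value=", " file=", " - ", ""],
     ["type", "description", "data_value", "file_ref", "notes"]) ]

-- Source B's _line: interleave literal fragments with fetched field values
def pvLine (frags fields : List String) (d : List (String × String)) : String :=
  match frags with
  | [] => ""
  | f0 :: rest => (fields.zip rest).foldl (fun out p => out ++ (pvGetS d p.1 ++ p.2)) f0

-- Source B's _section: one section as a single string with embedded newlines
def pvSection (test : List (String × List (List (String × String))))
    (spec : String × String × String × List String × List String) : String :=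
  let items := pvGetL test spec.1
  let body :=
    if !items.isEmpty then
      PySem.Str.join "" (items.map (fun d => pvLine spec.2.2.2.1 spec.2.2.2.2 d ++ "\n"))
    else "(none defined)\n"
  spec.2.1 ++ "\n" ++ spec.2.2.1 ++ "\n" ++ body

def build_variables_summary_alt (test : List (String × List (List (String × String)))) : String :=
  PySem.Str.join "\n" (pvSpecs.map (pvSection test))

-- ===== PRECONDITION & SPEC =====
def Spec_build_variables_summary (test : List (String × List (List (String × String)))) (out : String) : Prop := out = build_variables_summary_alt test
instance (test : List (String × List (List (String × String)))) (out : String) : Decidable (Spec_build_variables_summary test out) := by unfold Spec_build_variables_summary; infer_instance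

-- ===== CLAIM (what is proved, stated in full; the proofs are below) =====
def Claim_equal_build_variables_summary : Prop := ∀ (test : List (String × List (List (String × String)))), Dom_build_variables_summary test → Spec_build_variables_summary test (build_variables_summary test)

-- ===== LEMMAS AND PROOFS =====
theorem pv_foldl_snoc {α β : Type} (f : α → β) (l : List α) (init : List β) :
    l.foldl (fun ls x => ls ++ [f x]) init = init ++ l.map f := by
  induction l generalizing init with
  | nil => simp
  | cons a l ih => simp [List.foldl_cons, ih]

theorem pv_append_ite {α : Type} (c : Prop) [Decidable c] (a x y : List α) :
    (if c then a ++ x else a ++ y) = a ++ if c then x else y := by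
  split <;> rfl

theorem pv_cons_ite {α : Type} (c : Prop) [Decidable c] (a : α) (x y : List α) :
    (if c then a :: x else a :: y) = a :: if c then x else y := by
  split <;> rfl

theorem pv_join_single (a : String) : PySem.Str.join "\n" [a] = a := by
  apply String.toList_inj.mp
  simp [PySem.Str.join, PySem.Chars.join, List.intercalate]

theorem pv_join_cons_cons (a b : String) (t : List String) :
    PySem.Str.join "\n" (a :: b :: t) = a ++ "\n" ++ PySem.Str.join "\n" (b :: t) := by
  apply String.toList_inj.mp
  simp [PySem.Str.join, PySem.Chars.join, List.intercalate]

theorem pv_join_cons_ne (a : String) (l : List String) (h : l ≠ []) :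
    PySem.Str.join "\n" (a :: l) = a ++ "\n" ++ PySem.Str.join "\n" l := by
  cases l with
  | nil => exact absurd rfl h
  | cons b t => exact pv_join_cons_cons a b t

theorem pv_join_empty_cons (a : String) (t : List String) :
    PySem.Str.join "" (a :: t) = a ++ PySem.Str.join "" t := by
  apply String.toList_inj.mp
  cases t <;> simp [PySem.Str.join, PySem.Chars.join, List.intercalate]

theorem pv_join_cons_append_cons (a : String) (xs : List String) (b : String) (rest : List String) :
    PySem.Str.join "\n" (a :: (xs ++ b :: rest)) = a ++ "\n" ++ PySem.Str.join "\n" (xs ++ b :: rest) := by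
  exact pv_join_cons_ne a _ (by simp)

-- join over lines ++ [""] is the concatenation of each line followed by '\n'
theorem pv_join_lines_last (body : List String) :
    PySem.Str.join "\n" (body ++ [""]) = PySem.Str.join "" (body.map (· ++ "\n")) := by
  induction body with
  | nil =>
    apply String.toList_inj.mp
    simp [PySem.Str.join, PySem.Chars.join, List.intercalate]
  | cons a t ih =>
    rw [List.cons_append, pv_join_cons_ne a (t ++ [""]) (by simp), ih, List.map_cons,
      pv_join_empty_cons]

theorem pv_join_body_last {α : Type} (items : List α) (f : α → String) :
    PySem.Str.join "\n" ((if !items.isEmpty then items.map f else ["(none defined)"]) ++ [""])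
      = (if !items.isEmpty then PySem.Str.join "" (items.map (fun d => f d ++ "\n"))
         else "(none defined)\n") := by
  split
  · rw [pv_join_lines_last, List.map_map]; rfl
  · rw [pv_join_lines_last]; decide

theorem pv_join_append (xs ys : List String) (hx : xs ≠ []) (hy : ys ≠ []) :
    PySem.Str.join "\n" (xs ++ ys) = PySem.Str.join "\n" xs ++ "\n" ++ PySem.Str.join "\n" ys := by
  induction xs with
  | nil => exact absurd rfl hx
  | cons a t ih =>
    cases t with
    | nil => rw [List.singleton_append, pv_join_cons_ne a ys hy, pv_join_single]
    | cons b t' =>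
      rw [List.cons_append, pv_join_cons_ne a _ (by simp),
        ih (by simp), pv_join_cons_cons]
      apply String.toList_inj.mp
      simp

theorem pv_join_body_mid {α : Type} (items : List α) (f : α → String) (r : String) (rs : List String) :
    PySem.Str.join "\n" ((if !items.isEmpty then items.map f else ["(none defined)"]) ++ ("" :: r :: rs))
      = (if !items.isEmpty then PySem.Str.join "" (items.map (fun d => f d ++ "\n"))
         else "(none defined)\n") ++ ("\n" ++ PySem.Str.join "\n" (r :: rs)) := by
  have h : (if !items.isEmpty then items.map f else ["(none defined)"]) ++ ("" :: r :: rs)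
      = ((if !items.isEmpty then items.map f else ["(none defined)"]) ++ [""]) ++ (r :: rs) := by
    simp
  rw [h, pv_join_append _ _ (by split <;> simp_all) (by simp),
    pv_join_body_last]
  apply String.toList_inj.mp
  simp

-- ===== VERDICT (by name: the statement is the Claim_ definition above) =====
theorem build_variables_summary_spec : Claim_equal_build_variables_summary := by
  intro test _
  unfold Spec_build_variables_summary build_variables_summary build_variables_summary_alt
    pvSpecs pvSection pvLine
  simp only [pv_foldl_snoc, pv_append_ite, List.nil_append, List.append_assoc, List.cons_append, List.map_cons, List.map_nil, List.zip,
    List.zipWith, List.foldl, pv_cons_ite]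
  rw [pv_join_cons_cons, pv_join_cons_append_cons, pv_join_body_mid,
    pv_join_cons_cons, pv_join_cons_append_cons, pv_join_body_mid,
    pv_join_cons_cons, pv_join_cons_append_cons, pv_join_body_mid,
    pv_join_cons_cons, pv_join_cons_append_cons, pv_join_body_mid,
    pv_join_cons_cons, pv_join_cons_append_cons, pv_join_body_last,
    pv_join_cons_cons, pv_join_cons_cons, pv_join_cons_cons, pv_join_cons_cons, pv_join_single]
  simp only [String.append_assoc]
  split_ifs <;> (apply String.toList_inj.mp; simp)
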